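-- pv_equiv track=rewrite | github.com/aj112358/python_practice | text_messaging.py | generate_key_strokes
-- ===== SOURCE A (Python) =====
-- phone = {1: list(".,?!:"),
--          2: list("ABC"),
--          3: list("DEF"),
--          4: list("GHI"),
--          5: list("JKL"),
--          6: list("MNO"),
--          7: list("PQRS"),
--          8: list("TUV"),
--          9: list("WXYZ"),
--          0: list(" ")}
--
-- def generate_key_strokes(message: str) -> str:
--     """Convert text message to actual button presses."""
--
--     converted = ""
--     message = message.upper()
--
--     for letter in message:
--         for key in phone:
--             if letter in phone[key]:
--                 converted += str(key) * (phone[key].index(letter)+1)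
--
--     return converted
-- ===== SOURCE B (Python) =====
-- def _strokes(c):
--     """Keystrokes for one (already uppercased) character, computed arithmetically."""
--     if "A" <= c <= "Z":
--         i = ord(c) - 65
--         if i < 15:
--             key, pos = 2 + i // 3, i % 3
--         elif i < 19:
--             key, pos = 7, i - 15
--         elif i < 22:
--             key, pos = 8, i - 19
--         else:
--             key, pos = 9, i - 22
--         return str(key) * (pos + 1)
--     if c == " ":
--         return "0"
--     p = ".,?!:".find(c)
--     return "1" * (p + 1) if p >= 0 else ""
--
--
-- def generate_key_strokes(message: str) -> str:
--     """Convert text message to actual button presses."""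
--     return "".join(_strokes(c) for c in message.upper())
-- ===== Notes on version B (the rewrite author's own statement) =====
-- stated objective: faster
-- what changed: Replaces the keypad table entirely: B computes each character's key and repeat count arithmetically from its character code (i=ord(c)-65 with i//3, i%3 plus three boundary cases for PQRS/TUV/WXYZ, and a punctuation find), instead of A's scan over the ten keypad lists with membership test and list.index.
import Mathlib
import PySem

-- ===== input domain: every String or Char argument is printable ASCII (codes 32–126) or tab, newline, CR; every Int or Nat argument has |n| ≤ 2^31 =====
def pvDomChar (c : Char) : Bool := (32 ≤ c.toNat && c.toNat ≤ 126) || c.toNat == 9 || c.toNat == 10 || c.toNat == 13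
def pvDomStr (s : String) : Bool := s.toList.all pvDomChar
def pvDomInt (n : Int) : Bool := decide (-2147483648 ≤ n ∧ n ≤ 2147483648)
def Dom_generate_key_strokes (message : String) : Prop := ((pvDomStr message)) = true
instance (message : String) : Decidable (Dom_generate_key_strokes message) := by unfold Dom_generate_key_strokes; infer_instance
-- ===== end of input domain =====

-- B drops the keypad table: it computes each character's key and repeat count arithmetically from the character code (alternative algorithm).
set_option maxRecDepth 10000


-- ===== PORT A =====
-- the module-level dict 'phone', in insertion order
def phoneItems : List (Int × List Char) :=
  [(1, ['.', ',', '?', '!', ':']), (2, ['A', 'B', 'C']), (3, ['D', 'E', 'F']), (4, ['G', 'H', 'I']),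
   (5, ['J', 'K', 'L']), (6, ['M', 'N', 'O']), (7, ['P', 'Q', 'R', 'S']), (8, ['T', 'U', 'V']),
   (9, ['W', 'X', 'Y', 'Z']), (0, [' '])]

def generate_key_strokes (message : String) : String :=
  String.ofList <|
    (PySem.Str.upper message).toList.foldl (fun converted letter =>
      phoneItems.foldl (fun converted kv =>
        if letter ∈ kv.2 then
          converted ++ PySem.List.pyRepeat (PySem.Int.toChars kv.1)
            (((PySem.List.index? kv.2 letter).getD 0 : Int) + 1)
        else converted) converted) []

-- ===== PORT B =====
-- keystrokes for one (already uppercased) character, computed arithmetically (Source B's _strokes)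
def strokesB (c : Char) : List Char :=
  if 'A' ≤ c ∧ c ≤ 'Z' then
    let i : Int := (c.toNat : Int) - 65
    let kp : Int × Int :=
      if i < 15 then (2 + PySem.Int.floordiv i 3, PySem.Int.mod i 3)
      else if i < 19 then (7, i - 15)
      else if i < 22 then (8, i - 19)
      else (9, i - 22)
    PySem.List.pyRepeat (PySem.Int.toChars kp.1) (kp.2 + 1)
  else if c = ' ' then ['0']
  else
    let p := PySem.Chars.find ['.', ',', '?', '!', ':'] [c]
    if 0 ≤ p then PySem.List.pyRepeat ['1'] (p + 1) else []

def generate_key_strokes_alt (message : String) : String :=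
  String.ofList <|
    PySem.Chars.join [] ((PySem.Str.upper message).toList.map strokesB)

-- ===== PRECONDITION & SPEC =====
def Spec_generate_key_strokes (message : String) (out : String) : Prop := out = generate_key_strokes_alt message
instance (message : String) (out : String) : Decidable (Spec_generate_key_strokes message out) := by unfold Spec_generate_key_strokes; infer_instance

-- ===== CLAIM (what is proved, stated in full; the proofs are below) =====
def Claim_equal_generate_key_strokes : Prop := ∀ (message : String), Dom_generate_key_strokes message → Spec_generate_key_strokes message (generate_key_strokes message)

-- ===== LEMMAS AND PROOFS =====

-- A's inner loop over the keys, with the accumulator pulled out front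
def innerA (letter : Char) : List Char :=
  phoneItems.foldl (fun converted kv =>
    if letter ∈ kv.2 then
      converted ++ PySem.List.pyRepeat (PySem.Int.toChars kv.1)
        (((PySem.List.index? kv.2 letter).getD 0 : Int) + 1)
    else converted) []

-- every keypad character, for the case split
def allLetters : List Char := ['.', ',', '?', '!', ':', 'A', 'B', 'C', 'D', 'E', 'F', 'G', 'H', 'I', 'J', 'K', 'L', 'M', 'N', 'O', 'P', 'Q', 'R', 'S', 'T', 'U', 'V', 'W', 'X', 'Y', 'Z', ' ']

lemma inner_step_eq (letter : Char) :
    (fun (converted : List Char) (kv : Int × List Char) =>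
      if letter ∈ kv.2 then
        converted ++ PySem.List.pyRepeat (PySem.Int.toChars kv.1)
          (((PySem.List.index? kv.2 letter).getD 0 : Int) + 1)
      else converted)
    = (fun converted kv => converted ++
        (if letter ∈ kv.2 then
          PySem.List.pyRepeat (PySem.Int.toChars kv.1)
            (((PySem.List.index? kv.2 letter).getD 0 : Int) + 1)
        else [])) := by
  funext a kv; split <;> simp

lemma innerA_acc (letter : Char) (acc : List Char) :
    phoneItems.foldl (fun converted kv =>
      if letter ∈ kv.2 then
        converted ++ PySem.List.pyRepeat (PySem.Int.toChars kv.1)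
          (((PySem.List.index? kv.2 letter).getD 0 : Int) + 1)
      else converted) acc = acc ++ innerA letter := by
  unfold innerA
  rw [inner_step_eq, PySem.List.foldl_append_eq_flatMap, PySem.List.foldl_append_eq_flatMap]
  simp

lemma mem_of_all_contains {l1 l2 : List Char} (h : l1.all (fun x => l2.contains x) = true) :
    ∀ x ∈ l1, x ∈ l2 :=
  fun x hx => List.contains_iff_mem.mp (List.all_eq_true.mp h x hx)

-- an uppercase letter is one of the 26 keypad letters
lemma mem_allLetters_of_upper {c : Char} (h1 : 'A' ≤ c) (h2 : c ≤ 'Z') : c ∈ allLetters := by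
  have hv1 : 65 ≤ c.toNat := h1
  have hv2 : c.toNat ≤ 90 := h2
  have hofNat : Char.ofNat c.toNat = c := Char.ofNat_toNat c
  set n := c.toNat with hn
  rw [← hofNat]
  interval_cases n <;> decide

lemma innerA_eq_strokesB (letter : Char) :
    innerA letter = strokesB letter := by
  by_cases h : letter ∈ allLetters
  · have hb : allLetters.all (fun c => innerA c == strokesB c) = true := by decide
    exact beq_iff_eq.mp (List.all_eq_true.mp hb letter h)
  · have h1 : letter ∉ ['.', ',', '?', '!', ':'] := fun hc => h (mem_of_all_contains (by decide) letter (l1 := ['.', ',', '?', '!', ':']) hc)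
    have h2 : letter ∉ ['A', 'B', 'C'] := fun hc => h (mem_of_all_contains (by decide) letter (l1 := ['A', 'B', 'C']) hc)
    have h3 : letter ∉ ['D', 'E', 'F'] := fun hc => h (mem_of_all_contains (by decide) letter (l1 := ['D', 'E', 'F']) hc)
    have h4 : letter ∉ ['G', 'H', 'I'] := fun hc => h (mem_of_all_contains (by decide) letter (l1 := ['G', 'H', 'I']) hc)
    have h5 : letter ∉ ['J', 'K', 'L'] := fun hc => h (mem_of_all_contains (by decide) letter (l1 := ['J', 'K', 'L']) hc)
    have h6 : letter ∉ ['M', 'N', 'O'] := fun hc => h (mem_of_all_contains (by decide) letter (l1 := ['M', 'N', 'O']) hc)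
    have h7 : letter ∉ ['P', 'Q', 'R', 'S'] := fun hc => h (mem_of_all_contains (by decide) letter (l1 := ['P', 'Q', 'R', 'S']) hc)
    have h8 : letter ∉ ['T', 'U', 'V'] := fun hc => h (mem_of_all_contains (by decide) letter (l1 := ['T', 'U', 'V']) hc)
    have h9 : letter ∉ ['W', 'X', 'Y', 'Z'] := fun hc => h (mem_of_all_contains (by decide) letter (l1 := ['W', 'X', 'Y', 'Z']) hc)
    have h0 : letter ∉ [' '] := fun hc => h (mem_of_all_contains (by decide) letter (l1 := [' ']) hc)
    have hA : innerA letter = [] := by simp_all [innerA, phoneItems, List.foldl]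
    have hAZ : ¬ ('A' ≤ letter ∧ letter ≤ 'Z') := fun ⟨ha, hb⟩ => h (mem_allLetters_of_upper ha hb)
    have hsp : letter ≠ ' ' := by simpa using h0
    have hfind : PySem.Chars.find ['.', ',', '?', '!', ':'] [letter] = -1 := by
      rw [PySem.Chars.find_eq_neg_one_iff]
      intro hinf
      exact h1 (hinf.subset (List.mem_singleton_self letter))
    rw [hA]
    unfold strokesB
    rw [if_neg hAZ, if_neg hsp]
    simp [hfind]

lemma join_nil_eq_flatten (parts : List (List Char)) :
    PySem.Chars.join [] parts = parts.flatten := by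
  induction parts with
  | nil => simp [PySem.Chars.join_nil]
  | cons a t ih =>
    cases t with
    | nil => simp [PySem.Chars.join_singleton]
    | cons b r => rw [PySem.Chars.join_cons_cons]; simp [ih]

-- ===== VERDICT (by name: the statement is the Claim_ definition above) =====
theorem generate_key_strokes_spec : Claim_equal_generate_key_strokes := by
  intro message _
  unfold Spec_generate_key_strokes generate_key_strokes generate_key_strokes_alt
  congr 1
  have houter : (fun (converted : List Char) (letter : Char) =>
      phoneItems.foldl (fun converted kv =>
        if letter ∈ kv.2 then
          converted ++ PySem.List.pyRepeat (PySem.Int.toChars kv.1)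
            (((PySem.List.index? kv.2 letter).getD 0 : Int) + 1)
        else converted) converted)
      = (fun converted letter => converted ++ innerA letter) := by
    funext a c; exact innerA_acc c a
  rw [houter, PySem.List.foldl_append_eq_flatMap, join_nil_eq_flatten]
  simp only [List.flatMap_def, List.nil_append]
  congr 1
  exact List.map_congr_left (fun c _ => innerA_eq_strokesB c)
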